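-- pv_equiv track=rewrite | github.com/terrene-foundation/kailash-py | scripts/spec_drift_gate.py | _paragraph_around
-- ===== SOURCE A (Python) =====
-- def _paragraph_around(lines: list[str], line_no: int) -> str:
--     """Return the paragraph containing line_no (1-based).
--
--     Boundaries are blank lines or the file edges. Used for inline-negation
--     detection so prose like 'The v1-spec'd `LeaderboardReport` is NOT
--     implemented' suppresses the citation across the wrap-around lines.
--     """
--
--     if line_no - 1 < 0 or line_no - 1 >= len(lines):
--         return ""
--     start = line_no - 1
--     while start > 0 and lines[start - 1].strip() != "":
--         start -= 1
--     end = line_no - 1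
--     while end + 1 < len(lines) and lines[end + 1].strip() != "":
--         end += 1
--     return "\n".join(lines[start : end + 1])
-- ===== SOURCE B (Python) =====
-- def _paragraph_around(lines: list[str], line_no: int) -> str:
--     """Index-then-lookup: collect blank-line indices in one pass, then pick
--     the nearest blank strictly above / below the query line."""
--     q = line_no - 1
--     if q < 0 or q >= len(lines):
--         return ""
--     blanks = [i for i, s in enumerate(lines) if s.strip() == ""]
--     start = max((i for i in blanks if i < q), default=-1) + 1
--     end = min((i for i in blanks if i > q), default=len(lines)) - 1
--     return "\n".join(lines[start:end + 1])
-- ===== Notes on version B (the rewrite author's own statement) =====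
-- stated objective: alternative
-- what changed: Replaces the two outward while-loop scans with a single pass collecting blank-line indices, then computes the paragraph bounds as the nearest blank index strictly before/after the query line (max/min with defaults) and joins one slice.
import Mathlib
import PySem

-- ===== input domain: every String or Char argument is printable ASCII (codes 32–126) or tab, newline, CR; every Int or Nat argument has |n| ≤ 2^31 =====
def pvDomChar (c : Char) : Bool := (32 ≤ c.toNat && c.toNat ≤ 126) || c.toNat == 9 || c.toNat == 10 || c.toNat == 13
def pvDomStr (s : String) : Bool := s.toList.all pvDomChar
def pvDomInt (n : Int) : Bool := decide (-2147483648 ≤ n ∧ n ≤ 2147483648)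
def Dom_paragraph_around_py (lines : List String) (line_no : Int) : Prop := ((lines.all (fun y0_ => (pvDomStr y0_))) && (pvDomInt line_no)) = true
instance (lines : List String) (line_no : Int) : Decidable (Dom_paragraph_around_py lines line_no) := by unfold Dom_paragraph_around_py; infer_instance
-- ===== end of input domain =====

-- B is an alternative decomposition: one pass collecting blank-line indices, then
-- nearest-blank lookup via max/min, instead of A's two outward while-loop scans.

-- ===== PORT A =====
-- 'while start > 0 and lines[start-1].strip() != "": start -= 1'
def pvGoStart (lines : List String) : Nat → Nat
  | 0 => 0
  | s + 1 =>
    if PySem.Str.strip (PySem.List.pyGetD lines ((s : Nat) : Int) "") ≠ "" then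
      pvGoStart lines s
    else s + 1

-- 'while end + 1 < len(lines) and lines[end+1].strip() != "": end += 1'
def pvGoEnd (lines : List String) (e : Nat) : Nat :=
  if _h : e + 1 < lines.length then
    if PySem.Str.strip (PySem.List.pyGetD lines (((e + 1 : Nat)) : Int) "") ≠ "" then
      pvGoEnd lines (e + 1)
    else e
  else e
termination_by lines.length - e

def paragraph_around_py (lines : List String) (line_no : Int) : String :=
  if line_no - 1 < 0 ∨ line_no - 1 ≥ (lines.length : Int) then ""
  else
    let start := pvGoStart lines (line_no - 1).toNat
    let e := pvGoEnd lines (line_no - 1).toNat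
    PySem.Str.join "\n" (PySem.List.slice lines (some (start : Int)) (some ((e : Int) + 1)))

-- ===== PORT B =====
-- blanks = [i for i, s in enumerate(lines) if s.strip() == ""]
def pvBlanks (lines : List String) : List Int :=
  ((PySem.List.enumerate lines 0).filter (fun p => PySem.Str.strip p.2 == "")).map (·.1)

def paragraph_around_py_alt (lines : List String) (line_no : Int) : String :=
  let q := line_no - 1
  if q < 0 ∨ q ≥ (lines.length : Int) then ""
  else
    let blanks := pvBlanks lines
    let start := ((blanks.filter (fun i => i < q)).foldl max (-1)) + 1
    let e := ((blanks.filter (fun i => q < i)).foldl min (lines.length : Int)) - 1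
    PySem.Str.join "\n" (PySem.List.slice lines (some start) (some (e + 1)))

-- ===== PRECONDITION & SPEC =====
def Spec_paragraph_around_py (lines : List String) (line_no : Int) (out : String) : Prop := out = paragraph_around_py_alt lines line_no
instance (lines : List String) (line_no : Int) (out : String) : Decidable (Spec_paragraph_around_py lines line_no out) := by unfold Spec_paragraph_around_py; infer_instance

-- ===== CLAIM (what is proved, stated in full; the proofs are below) =====
def Claim_equal_paragraph_around_py : Prop := ∀ (lines : List String) (line_no : Int), Dom_paragraph_around_py lines line_no → Spec_paragraph_around_py lines line_no (paragraph_around_py lines line_no)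

-- ===== LEMMAS AND PROOFS =====

theorem mem_pvBlanks (lines : List String) (i : Int) :
    i ∈ pvBlanks lines ↔ ∃ k : Nat, k < lines.length ∧ i = (k : Int) ∧ PySem.Str.strip (lines[k]?.getD "") = "" := by
  unfold pvBlanks
  simp only [List.mem_map, List.mem_filter, PySem.List.mem_enumerate_iff]
  constructor
  · rintro ⟨p, ⟨⟨k, hk, rfl⟩, hb⟩, rfl⟩
    refine ⟨k, hk, by simp, ?_⟩
    simpa [hk] using (beq_iff_eq.mp hb)
  · rintro ⟨k, hk, rfl, hb⟩
    exact ⟨((k : Int), lines[k]), ⟨⟨k, hk, by simp⟩, by simpa [hk] using hb⟩, rfl⟩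

theorem pvGoStart_eq (lines : List String) :
    ∀ q : Nat, q ≤ lines.length →
      ((pvGoStart lines q : Int)) = (((pvBlanks lines).filter (fun i => i < (q : Int))).foldl max (-1)) + 1 := by
  intro q
  induction q with
  | zero =>
    intro _
    have hnil : (pvBlanks lines).filter (fun i => i < ((0 : Nat) : Int)) = [] := by
      rw [List.filter_eq_nil_iff]
      intro i hi
      rcases (mem_pvBlanks lines i).mp hi with ⟨k, _, rfl, _⟩
      simp
    rw [hnil]
    simp [pvGoStart]
  | succ s ih =>
    intro hle
    have hs : s < lines.length := by omega
    by_cases hb : PySem.Str.strip (lines[s]?.getD "") = ""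
    · -- blank at s: the loop stops at s+1, and the largest blank index < s+1 is s
      have hstep : pvGoStart lines (s + 1) = s + 1 := by
        simp [pvGoStart, List.getD_eq_getElem?_getD, hb]
      rw [hstep]
      have hmem : ((s : Nat) : Int) ∈ (pvBlanks lines).filter (fun i => i < ((s + 1 : Nat) : Int)) := by
        rw [List.mem_filter]
        refine ⟨(mem_pvBlanks lines _).mpr ⟨s, hs, rfl, hb⟩, by simp only [decide_eq_true_eq]; push_cast; omega⟩
      have hge := (PySem.List.le_foldl_max ((pvBlanks lines).filter (fun i => i < ((s + 1 : Nat) : Int))) (-1)).2 _ hmem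
      have hmm := PySem.List.foldl_max_mem ((pvBlanks lines).filter (fun i => i < ((s + 1 : Nat) : Int))) (-1)
      have hlt : ((pvBlanks lines).filter (fun i => i < ((s + 1 : Nat) : Int))).foldl max (-1) < ((s + 1 : Nat) : Int) := by
        rcases hmm with h | h
        · push_cast; omega
        · rw [List.mem_filter] at h
          simpa using h.2
      push_cast at hge hlt ⊢
      omega
    · -- nonblank at s: same boundary as for s, use the induction hypothesis
      have hstep : pvGoStart lines (s + 1) = pvGoStart lines s := by
        simp [pvGoStart, List.getD_eq_getElem?_getD, hb]
      have hfil : (pvBlanks lines).filter (fun i => i < ((s + 1 : Nat) : Int))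
          = (pvBlanks lines).filter (fun i => i < ((s : Nat) : Int)) := by
        apply List.filter_congr
        intro i hi
        rcases (mem_pvBlanks lines i).mp hi with ⟨k, hk, rfl, hbk⟩
        have hne : k ≠ s := by rintro rfl; exact hb hbk
        have hne' : (k : Int) ≠ (s : Int) := by exact_mod_cast hne
        simp only [decide_eq_decide]
        push_cast
        omega
      rw [hstep, hfil, ih (by omega)]

theorem pvGoEnd_eq (lines : List String) :
    ∀ d e : Nat, lines.length - e ≤ d → e < lines.length →
      ((pvGoEnd lines e : Int)) = (((pvBlanks lines).filter (fun i => (e : Int) < i)).foldl min (lines.length : Int)) - 1 := by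
  intro d
  induction d with
  | zero => intro e hd he; omega
  | succ d ih =>
    intro e hd he
    by_cases hin : e + 1 < lines.length
    · by_cases hb : PySem.Str.strip (lines[e+1]?.getD "") = ""
      · -- blank at e+1: loop stops at e; smallest blank index > e is e+1
        have hb2 : PySem.Str.strip (PySem.List.pyGetD lines ((e : Int) + 1) "") = "" := by
          have hcast : ((e : Int) + 1) = (((e + 1 : Nat)) : Int) := by push_cast; ring
          rw [hcast, PySem.List.pyGetD_natCast, List.getD_eq_getElem?_getD]; exact hb
        have hstep : pvGoEnd lines e = e := by
          rw [pvGoEnd]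
          simp [hin, hb2]
        rw [hstep]
        have hmem : (((e + 1 : Nat)) : Int) ∈ (pvBlanks lines).filter (fun i => (e : Int) < i) := by
          rw [List.mem_filter]
          refine ⟨(mem_pvBlanks lines _).mpr ⟨e + 1, hin, rfl, hb⟩, by simp only [decide_eq_true_eq]; push_cast; omega⟩
        have hle := (PySem.List.foldl_min_le ((pvBlanks lines).filter (fun i => (e : Int) < i)) ((lines.length : Int))).2 _ hmem
        have hmm := PySem.List.foldl_min_mem ((pvBlanks lines).filter (fun i => (e : Int) < i)) ((lines.length : Int))
        have hgt : (e : Int) < ((pvBlanks lines).filter (fun i => (e : Int) < i)).foldl min (lines.length : Int) := by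
          rcases hmm with h | h
          · omega
          · rw [List.mem_filter] at h
            simpa using h.2
        push_cast at hle hgt ⊢
        omega
      · -- nonblank at e+1: loop advances; same boundary as for e+1
        have hb2 : ¬ PySem.Str.strip (PySem.List.pyGetD lines ((e : Int) + 1) "") = "" := by
          have hcast : ((e : Int) + 1) = (((e + 1 : Nat)) : Int) := by push_cast; ring
          rw [hcast, PySem.List.pyGetD_natCast, List.getD_eq_getElem?_getD]; exact hb
        have hstep : pvGoEnd lines e = pvGoEnd lines (e + 1) := by
          rw [pvGoEnd]
          simp [hin, hb2]
        have hfil : (pvBlanks lines).filter (fun i => (e : Int) < i)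
            = (pvBlanks lines).filter (fun i => ((e + 1 : Nat) : Int) < i) := by
          apply List.filter_congr
          intro i hi
          rcases (mem_pvBlanks lines i).mp hi with ⟨k, hk, rfl, hbk⟩
          have hne : k ≠ e + 1 := by rintro rfl; exact hb hbk
          have hne' : (k : Int) ≠ ((e + 1 : Nat) : Int) := by exact_mod_cast hne
          simp only [decide_eq_decide]
          push_cast at hne' ⊢
          omega
        rw [hstep, hfil, ih (e + 1) (by omega) hin]
    · -- e is the last line: loop stops at e; no blank index > e exists
      have hstep : pvGoEnd lines e = e := by
        rw [pvGoEnd]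
        simp [hin]
      have hnil : (pvBlanks lines).filter (fun i => (e : Int) < i) = [] := by
        rw [List.filter_eq_nil_iff]
        intro i hi
        rcases (mem_pvBlanks lines i).mp hi with ⟨k, hk, rfl, _⟩
        simp only [decide_eq_true_eq]
        omega
      rw [hstep, hnil]
      simp only [List.foldl_nil]
      omega

-- ===== VERDICT (by name: the statement is the Claim_ definition above) =====
theorem paragraph_around_py_spec : Claim_equal_paragraph_around_py := by
  intro lines line_no _dom
  unfold Spec_paragraph_around_py paragraph_around_py paragraph_around_py_alt
  dsimp only
  by_cases hg : line_no - 1 < 0 ∨ line_no - 1 ≥ (lines.length : Int)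
  · rw [if_pos hg, if_pos hg]
  · have h0 : 0 ≤ line_no - 1 := by omega
    have hlt : line_no - 1 < (lines.length : Int) := by omega
    have hq : (((line_no - 1).toNat : Nat) : Int) = line_no - 1 := Int.toNat_of_nonneg h0
    have hqle : (line_no - 1).toNat ≤ lines.length := by omega
    have hqlt : (line_no - 1).toNat < lines.length := by omega
    rw [if_neg hg, if_neg hg]
    rw [pvGoStart_eq lines _ hqle, pvGoEnd_eq lines (lines.length - (line_no - 1).toNat) _ (le_refl _) hqlt, hq]
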